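-- pv_equiv track=rewrite | github.com/domino14/advent_of_code | prob17.py | count_water
-- ===== SOURCE A (Python) =====
-- def count_water(map):
--     settled_ct = 0
--     sand_ct = 0
--     for x, ys in map.items():
--         for y, tileval in ys.items():
--             if tileval == '~':
--                 settled_ct += 1
--             elif tileval == '|':
--                 sand_ct += 1
--     return settled_ct, sand_ct
-- ===== SOURCE B (Python) =====
-- def count_water(map):
--     vals = [v for ys in map.values() for v in ys.values()]
--     return vals.count('~'), vals.count('|')
-- ===== Notes on version B (the rewrite author's own statement) =====
-- stated objective: idiomatic
-- what changed: Replaces the nested per-tile branching loop with two counters by flattening all tile values into one list and selecting the '~' and '|' totals with list.count.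
import Mathlib
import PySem

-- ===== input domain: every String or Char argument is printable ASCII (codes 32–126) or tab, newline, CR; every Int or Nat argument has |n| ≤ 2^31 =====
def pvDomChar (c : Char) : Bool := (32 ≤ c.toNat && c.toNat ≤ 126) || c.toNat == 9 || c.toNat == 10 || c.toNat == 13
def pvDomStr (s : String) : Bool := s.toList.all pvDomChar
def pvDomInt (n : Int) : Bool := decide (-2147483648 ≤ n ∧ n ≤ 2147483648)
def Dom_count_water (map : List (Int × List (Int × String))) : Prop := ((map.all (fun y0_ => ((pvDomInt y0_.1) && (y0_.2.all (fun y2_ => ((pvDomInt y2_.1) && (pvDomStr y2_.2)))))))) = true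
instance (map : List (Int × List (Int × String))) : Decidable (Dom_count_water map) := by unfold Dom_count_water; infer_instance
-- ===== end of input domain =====

-- B flattens the tile values into one list and uses list.count twice instead of A's per-tile branching loop (idiomatic).

-- ===== PORT A =====
def count_water (map : List (Int × List (Int × String))) : Int × Int :=
  map.foldl (fun (acc : Int × Int) xys =>
    xys.2.foldl (fun (acc : Int × Int) yv =>
      if yv.2 = "~" then (acc.1 + 1, acc.2)
      else if yv.2 = "|" then (acc.1, acc.2 + 1)
      else acc) acc) (0, 0)

-- ===== PORT B =====
def count_water_alt (map : List (Int × List (Int × String))) : Int × Int :=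
  let vals := map.flatMap (fun xys => xys.2.map (fun yv => yv.2))
  ((PySem.List.count vals "~" : Int), (PySem.List.count vals "|" : Int))

-- ===== PRECONDITION & SPEC =====
def Spec_count_water (map : List (Int × List (Int × String))) (out : Int × Int) : Prop := out = count_water_alt map
instance (map : List (Int × List (Int × String))) (out : Int × Int) : Decidable (Spec_count_water map out) := by unfold Spec_count_water; infer_instance

-- ===== CLAIM (what is proved, stated in full; the proofs are below) =====
def Claim_equal_count_water : Prop := ∀ (map : List (Int × List (Int × String))), Dom_count_water map → Spec_count_water map (count_water map)

-- ===== LEMMAS AND PROOFS =====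

theorem cw_inner (l : List (Int × String)) (acc : Int × Int) :
    l.foldl (fun (acc : Int × Int) yv =>
      if yv.2 = "~" then (acc.1 + 1, acc.2)
      else if yv.2 = "|" then (acc.1, acc.2 + 1)
      else acc) acc
    = (acc.1 + ((l.map Prod.snd).count "~" : Int),
       acc.2 + ((l.map Prod.snd).count "|" : Int)) := by
  induction l generalizing acc with
  | nil => simp
  | cons h t ih =>
    simp only [List.foldl_cons, List.map_cons, ih]
    by_cases h1 : h.2 = "~"
    · simp [h1, List.count_cons]; ring
    · by_cases h2 : h.2 = "|"
      · simp [h1, h2, List.count_cons]; ring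
      · simp [h1, h2, List.count_cons]

theorem cw_outer (m : List (Int × List (Int × String))) (acc : Int × Int) :
    m.foldl (fun (acc : Int × Int) xys =>
      xys.2.foldl (fun (acc : Int × Int) yv =>
        if yv.2 = "~" then (acc.1 + 1, acc.2)
        else if yv.2 = "|" then (acc.1, acc.2 + 1)
        else acc) acc) acc
    = (acc.1 + (((m.flatMap (fun xys => xys.2.map (fun yv => yv.2))).count "~" : Nat) : Int),
       acc.2 + (((m.flatMap (fun xys => xys.2.map (fun yv => yv.2))).count "|" : Nat) : Int)) := by
  induction m generalizing acc with
  | nil => simp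
  | cons h t ih =>
    rw [List.foldl_cons, ih, cw_inner]
    simp only [List.flatMap_cons, List.count_append, Prod.mk.injEq]
    constructor <;> (push_cast; ring)

-- ===== VERDICT (by name: the statement is the Claim_ definition above) =====
theorem count_water_spec : Claim_equal_count_water := by
  intro m _
  show count_water m = count_water_alt m
  simp [count_water, count_water_alt, cw_outer, PySem.List.count_eq]
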